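-- pv_equiv track=rewrite | github.com/ByronT14/Wordle-Solver | wordle_solver/wordle_functions.py | get_position_of_multiple_letters
-- ===== SOURCE A (Python) =====
-- def get_position_of_multiple_letters(entered_word, multiple_letters_list):
--     """
--     Function to identify the position of duplicate letters in a word
--     :param entered_word: Word that has been entered as a guess
--     :param multiple_letters_list: Dictionary that contains the letters that are duplicate
--     :return: a dictionary that contains duplicate letters and the positions in the guessed word where they appear
--     """
--     multiple_letters_position_dict = dict()
--     if len(multiple_letters_list) > 0:
--         # multiple_letters_position_dict = {l: [pos for pos, char in enumerate(entered_word) if char == l]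
--         #                                   for l in multiple_letters_list}
--         for key in multiple_letters_list:
--             pos_list = list()
--             for pos in range(len(entered_word)):
--                 if entered_word[pos] == key:
--                     pos_list.append(pos)
--             multiple_letters_position_dict[key] = pos_list
--     return multiple_letters_position_dict
-- ===== SOURCE B (Python) =====
-- def get_position_of_multiple_letters(entered_word, multiple_letters_list):
--     """
--     Build a full character -> positions index of the word in one pass,
--     then select the entries for the requested letters.
--     """
--     index = {}
--     for pos, char in enumerate(entered_word):
--         index.setdefault(char, []).append(pos)
--     return {key: index.get(key, []) for key in multiple_letters_list}
-- ===== Notes on version B (the rewrite author's own statement) =====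
-- stated objective: faster
-- what changed: Replaces the per-key rescan of the word (one full scan of entered_word for every key) by a single enumerate pass that builds a char->positions index, then a dict comprehension selecting each key's positions.
import Mathlib
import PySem

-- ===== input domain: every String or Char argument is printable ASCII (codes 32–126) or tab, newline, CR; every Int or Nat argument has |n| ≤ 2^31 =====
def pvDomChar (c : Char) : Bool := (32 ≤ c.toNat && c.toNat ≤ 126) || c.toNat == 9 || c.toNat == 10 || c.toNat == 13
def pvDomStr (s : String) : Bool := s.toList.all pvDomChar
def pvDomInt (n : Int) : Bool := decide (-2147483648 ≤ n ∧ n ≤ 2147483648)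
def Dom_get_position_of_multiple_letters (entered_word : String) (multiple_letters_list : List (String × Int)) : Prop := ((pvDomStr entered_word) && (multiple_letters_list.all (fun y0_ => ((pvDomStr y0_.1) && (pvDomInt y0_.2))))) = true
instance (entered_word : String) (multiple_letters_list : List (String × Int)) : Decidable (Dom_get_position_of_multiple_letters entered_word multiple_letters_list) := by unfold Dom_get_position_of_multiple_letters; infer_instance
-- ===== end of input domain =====

-- B replaces A's full rescan of the word for every key by one enumerate pass building a
-- char->positions index, then selects each key's entry: one pass over the word instead of one per key (objective: faster).

-- ===== PORT A =====
-- Python A iterates over the keys of the dict `multiple_letters_list` (distinct, in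
-- insertion order = first occurrences of the association list: PySem.List.dedup of the keys)
-- and, per key, scans every position of entered_word; entered_word[pos] is a 1-character
-- string, ported exactly as (Str.pyGet? …).map (fun c => String.ofList [c]).
def get_position_of_multiple_letters (entered_word : String) (multiple_letters_list : List (String × Int)) : List (String × List Int) :=
  let d0 : PySem.Dict String (List Int) := PySem.Dict.empty
  let d :=
    if multiple_letters_list.length > 0 then
      (PySem.List.dedup (multiple_letters_list.map (·.1))).foldl
        (fun d key =>
          let pos_list : List Int :=
            (PySem.List.pyRange 0 (PySem.Str.len entered_word)).foldl
              (fun pl pos =>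
                if (PySem.Str.pyGet? entered_word pos).map (fun c => String.ofList [c]) = some key
                then pl ++ [pos] else pl) []
          d.insert key pos_list) d0
    else d0
  d.items

-- ===== PORT B =====
-- index.setdefault(char, []).append(pos) is Dict.modify char [] (· ++ [pos]); the final
-- dict comprehension runs over the distinct keys, each looked up in the index.
def get_position_of_multiple_letters_alt (entered_word : String) (multiple_letters_list : List (String × Int)) : List (String × List Int) :=
  let index : PySem.Dict String (List Int) :=
    (PySem.List.enumerate entered_word.toList).foldl
      (fun d p => d.modify (String.ofList [p.2]) [] (· ++ [p.1])) PySem.Dict.empty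
  (PySem.List.dedup (multiple_letters_list.map (·.1))).map
    (fun key => (key, index.getD key []))

-- ===== PRECONDITION & SPEC =====
def Spec_get_position_of_multiple_letters (entered_word : String) (multiple_letters_list : List (String × Int)) (out : List (String × List Int)) : Prop := out = get_position_of_multiple_letters_alt entered_word multiple_letters_list
instance (entered_word : String) (multiple_letters_list : List (String × Int)) (out : List (String × List Int)) : Decidable (Spec_get_position_of_multiple_letters entered_word multiple_letters_list out) := by unfold Spec_get_position_of_multiple_letters; infer_instance

-- ===== CLAIM (what is proved, stated in full; the proofs are below) =====
def Claim_equal_get_position_of_multiple_letters : Prop := ∀ (entered_word : String) (multiple_letters_list : List (String × Int)), Dom_get_position_of_multiple_letters entered_word multiple_letters_list → Spec_get_position_of_multiple_letters entered_word multiple_letters_list (get_position_of_multiple_letters entered_word multiple_letters_list)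

-- ===== LEMMAS AND PROOFS =====

-- A's inner scan for one key, and B's index, as standalone terms (definitionally the
-- bodies used in the two ports).
def pvPosScan (w : String) (key : String) : List Int :=
  (PySem.List.pyRange 0 (PySem.Str.len w)).foldl
    (fun pl pos =>
      if (PySem.Str.pyGet? w pos).map (fun c => String.ofList [c]) = some key
      then pl ++ [pos] else pl) []

def pvIdx (w : String) : PySem.Dict String (List Int) :=
  (PySem.List.enumerate w.toList).foldl
    (fun d p => d.modify (String.ofList [p.2]) [] (· ++ [p.1])) PySem.Dict.empty

-- per-key agreement: A's scan of the word for `key` is exactly B's index entry for `key`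
theorem pvKey_lemma (w key : String) : pvPosScan w key = (pvIdx w).getD key [] := by
  unfold pvPosScan pvIdx
  rw [PySem.List.foldl_append_ite_eq_filter
    (fun pos => (PySem.Str.pyGet? w pos).map (fun c => String.ofList [c]) = some key)]
  have hfm : List.foldl
      (fun (d : PySem.Dict String (List Int)) (p : Int × Char) =>
        d.modify (String.ofList [p.2]) [] (· ++ [p.1]))
      PySem.Dict.empty (PySem.List.enumerate w.toList)
    = List.foldl (fun (d : PySem.Dict String (List Int)) (q : String × Int) =>
        d.modify q.1 [] (· ++ [q.2]))
      PySem.Dict.empty ((PySem.List.enumerate w.toList).map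
        (fun p : Int × Char => (String.ofList [p.2], p.1))) :=
    by rw [List.foldl_map]
  rw [hfm]
  rw [PySem.Dict.getD_foldl_modify_append]
  rw [PySem.List.enumerate_eq_map_pyRange w.toList ' ']
  simp only [List.map_map, List.filter_map, List.nil_append]
  have hlen : PySem.List.len w.toList = PySem.Str.len w := by simp [pysem]
  rw [hlen]
  rw [show ((fun x : String × Int => x.2) ∘ (fun q : Int × Char => (String.ofList [q.2], q.1)) ∘
        (fun j : Int => (j, PySem.List.pyGetD w.toList j ' '))) = fun j : Int => j from rfl]
  rw [List.map_id'']
  apply List.filter_congr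
  intro j hj
  rw [PySem.List.mem_pyRange_one] at hj
  have h0 : (0:Int) ≤ j := hj.1
  have hlt : j.toNat < w.toList.length := by
    have h2 := hj.2
    rw [← hlen] at h2
    simp only [PySem.List.len] at h2
    omega
  simp only [Function.comp]
  rw [PySem.List.pyGetD_of_nonneg _ _ h0]
  have hg : PySem.Str.pyGet? w j = some w.toList[j.toNat] := by
    simp only [PySem.Str.pyGet?_eq, PySem.Chars.pyGet?_eq_listPyGet?]
    rw [PySem.List.pyGet?_of_nonneg _ h0]
    simp only [hlt, getElem?_pos]
  rw [hg, List.getD_eq_getElem _ _ hlt]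
  · exact (Bool.beq_eq_decide_eq _ _).symm
  · exact fun x => rfl

theorem pvAB_eq (w : String) (ml : List (String × Int)) :
    get_position_of_multiple_letters w ml = get_position_of_multiple_letters_alt w ml := by
  unfold get_position_of_multiple_letters get_position_of_multiple_letters_alt
  by_cases h : ml.length > 0
  · simp only [h, if_pos]
    have hmain := PySem.Dict.items_foldl_insert_fresh
      (PySem.List.dedup (ml.map (·.1))) (fun k => k) (fun k => pvPosScan w k)
      PySem.Dict.empty (fun a _ => PySem.Dict.contains_empty a)
      (by simp)
    refine Eq.trans (b := PySem.Dict.empty.items ++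
      (PySem.List.dedup (ml.map (·.1))).map (fun k => ((fun k => k) k, pvPosScan w k))) hmain ?_
    simp only [PySem.Dict.empty, List.nil_append]
    exact List.map_congr_left (fun k _ => by rw [pvKey_lemma]; rfl)
  · have hml : ml = [] := by
      cases ml with
      | nil => rfl
      | cons a t => simp at h
    subst hml
    simp [PySem.List.dedup, PySem.Dict.empty]

-- ===== VERDICT (by name: the statement is the Claim_ definition above) =====
theorem get_position_of_multiple_letters_spec : Claim_equal_get_position_of_multiple_letters := by
  intro w ml _
  exact pvAB_eq w ml
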